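-- pv_equiv track=rewrite | github.com/AthharPro/zypher | python-scanner/zypher_scanner/db_ruls/cicd-vuln-007.py | _find_azure_task_line
-- ===== SOURCE A (Python) =====
-- from typing import List, Dict, Any
--
-- def _find_azure_task_line(file_lines: List[str], job_index: int, step_index: int) -> int:
--     job_count = -1
--     job_line = -1
--     step_count = -1
--     for i, line in enumerate(file_lines):
--         if "- job:" in line:
--             job_count += 1
--             if job_count == job_index:
--                 job_line = i
--                 break
--     if job_line < 0:
--         return -1
--     steps_line = -1
--     for i in range(job_line, len(file_lines)):
--         if "steps:" in file_lines[i]: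
--             steps_line = i
--             break
--     if steps_line < 0:
--         return -1
--     for i in range(steps_line + 1, len(file_lines)):
--         if "- task:" in file_lines[i]:
--             step_count += 1
--             if step_count == step_index:
--                 return i
--         if line.strip() and not line.strip().startswith("-") and not line.strip().startswith(" "):
--             break
--     return -1
-- ===== SOURCE B (Python) =====
-- from typing import List
--
-- def _find_azure_task_line(file_lines: List[str], job_index: int, step_index: int) -> int:
--     phase = 0            # 0: find the job header, 1: find steps:, 2: count tasks
--     job_count = -1
--     step_count = -1
--     for i, line in enumerate(file_lines):
--         if phase == 0:
--             if "- job:" in line: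
--                 job_count += 1
--                 if job_count == job_index:
--                     phase = 1   # the job line itself may also carry "steps:"
--                 else:
--                     continue
--             else:
--                 continue
--         if phase == 1:
--             if "steps:" in line:
--                 phase = 2
--             continue
--         if "- task:" in line:
--             step_count += 1
--             if step_count == step_index:
--                 return i
--     return -1
-- ===== Notes on version B (the rewrite author's own statement) =====
-- stated objective: simpler
-- what changed: A's three sequential scans (find the job line, re-scan by index for 'steps:', re-scan by index for '- task:' with a break that tests a stale loop variable) are fused into one pass over enumerate(file_lines) driven by a phase variable, with no early-abort in the task phase.
-- intended difference: On inputs where the selected '- job:' line's stripped text does not start with '-' (and a 'steps:' line and enough '- task:' lines follow), A's break tests the stale job-line variable instead of the current line and aborts the task scan after one line, returning -1 (or only an immediately-adjacent first task), while B returns the requested task's line number, which is the intended result. — e.g. on _find_azure_task_line(["x- job:", "steps:", "", "- task:"], 0, 0): A returns -1, B returns 3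
import Mathlib
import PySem

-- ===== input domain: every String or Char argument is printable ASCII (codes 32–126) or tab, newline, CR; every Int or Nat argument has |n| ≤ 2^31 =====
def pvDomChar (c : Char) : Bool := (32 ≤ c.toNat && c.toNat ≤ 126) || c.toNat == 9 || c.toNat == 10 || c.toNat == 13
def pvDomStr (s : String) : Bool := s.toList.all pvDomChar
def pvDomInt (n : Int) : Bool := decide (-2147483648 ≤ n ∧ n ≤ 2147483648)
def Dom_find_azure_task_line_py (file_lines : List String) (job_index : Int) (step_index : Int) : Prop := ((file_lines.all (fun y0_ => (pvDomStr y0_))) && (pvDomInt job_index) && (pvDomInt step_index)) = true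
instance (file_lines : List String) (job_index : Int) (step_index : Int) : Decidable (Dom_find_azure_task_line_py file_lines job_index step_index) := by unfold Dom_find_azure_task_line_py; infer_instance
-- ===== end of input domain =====

-- B fuses A's three sequential scans into one pass driven by a phase variable (simpler); A's break in the
-- task loop tests a stale variable, so on the D_ inputs below A aborts early and B returns the intended line.

-- ===== PORT A =====
-- first loop: for i, line in enumerate(file_lines): "- job:" counting with break;
-- returns the break point (i, line) — `line` is the stale loop variable A's last loop reads
def aJobLoop (pairs : List (Int × String)) (job_index : Int) (job_count : Int) : Option (Int × String) :=
  match pairs with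
  | [] => none
  | (i, line) :: rest =>
      if PySem.Str.isIn "- job:" line then
        (if job_count + 1 = job_index then some (i, line)
         else aJobLoop rest job_index (job_count + 1))
      else aJobLoop rest job_index job_count

-- second loop: for i in range(job_line, len(file_lines)) with break on "steps:" (else steps_line = -1)
def aStepsLoop (idxs : List Int) (file_lines : List String) : Int :=
  match idxs with
  | [] => -1
  | i :: rest =>
      if PySem.Str.isIn "steps:" (PySem.List.pyGetD file_lines i "") then i
      else aStepsLoop rest file_lines

-- the break condition of the third loop; it reads the STALE `line` from the first loop, exactly as the Python does
def aBreak (line : String) : Bool :=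
  (!(PySem.Str.strip line == "")) && (!(PySem.Str.startswith (PySem.Str.strip line) "-")) && (!(PySem.Str.startswith (PySem.Str.strip line) " "))

-- third loop: for i in range(steps_line + 1, len(file_lines))
def aTaskLoop (idxs : List Int) (file_lines : List String) (line : String) (step_index : Int) (step_count : Int) : Int :=
  match idxs with
  | [] => -1
  | i :: rest =>
      if PySem.Str.isIn "- task:" (PySem.List.pyGetD file_lines i "") then
        (if step_count + 1 = step_index then i
         else if aBreak line then -1
         else aTaskLoop rest file_lines line step_index (step_count + 1))
      else if aBreak line then -1
      else aTaskLoop rest file_lines line step_index step_count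

def find_azure_task_line_py (file_lines : List String) (job_index : Int) (step_index : Int) : Int :=
  -- `none` is exactly Python's job_line < 0 early return
  match aJobLoop (PySem.List.enumerate file_lines 0) job_index (-1) with
  | none => -1
  | some (job_line, line) =>
      let steps_line := aStepsLoop (PySem.List.pyRange job_line (file_lines.length : Int) 1) file_lines
      if steps_line < 0 then -1
      else aTaskLoop (PySem.List.pyRange (steps_line + 1) (file_lines.length : Int) 1) file_lines line step_index (-1)

-- ===== PORT B =====
-- Source B: one for-loop over enumerate(file_lines) driven by `phase`
def bGo (pairs : List (Int × String)) (job_index : Int) (step_index : Int)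
    (phase : Nat) (job_count : Int) (step_count : Int) : Int :=
  match pairs with
  | [] => -1
  | (i, line) :: rest =>
      if phase = 0 then
        (if PySem.Str.isIn "- job:" line then
          (if job_count + 1 = job_index then
            -- phase := 1; fall through: the job line itself may also carry "steps:"
            (if PySem.Str.isIn "steps:" line then
               bGo rest job_index step_index 2 (job_count + 1) step_count
             else
               bGo rest job_index step_index 1 (job_count + 1) step_count)
          else bGo rest job_index step_index 0 (job_count + 1) step_count)
        else bGo rest job_index step_index 0 job_count step_count)
      else if phase = 1 then
        (if PySem.Str.isIn "steps:" line then
          bGo rest job_index step_index 2 job_count step_count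
        else bGo rest job_index step_index 1 job_count step_count)
      else
        if PySem.Str.isIn "- task:" line then
          (if step_count + 1 = step_index then i
           else bGo rest job_index step_index 2 job_count (step_count + 1))
        else bGo rest job_index step_index 2 job_count step_count

def find_azure_task_line_py_alt (file_lines : List String) (job_index : Int) (step_index : Int) : Int :=
  bGo (PySem.List.enumerate file_lines 0) job_index step_index 0 (-1) (-1)

-- ===== PRECONDITION & SPEC =====
-- Input-shape helper for D_: indices ≥ k of the lines containing pat (independent of either port's recursion)
def pvHits (pat : String) (xs : List String) (k : Nat) : List Nat :=
  (List.range' k (xs.length - k)).filter fun i => PySem.Str.isIn pat <| xs.getD i ""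

-- On inputs where the selected "- job:" line has stripped text not starting with "-" and the requested
-- task is not the line right after the "steps:" line, A's break (which tests the stale job line instead
-- of the current line) aborts the task scan after one line and A returns -1 (or just the first line),
-- while B returns the requested task's line number, which is the intended result.
def D_find_azure_task_line_py (file_lines : List String) (job_index : Int) (step_index : Int) : Prop :=
  0 ≤ min job_index step_index ∧
  ((pvHits "- job:" file_lines 0)[job_index.toNat]?.any fun j =>
    aBreak file_lines[j]! &&
    (pvHits "steps:" file_lines j).head?.any fun s =>
      (pvHits "- task:" file_lines (s + 1))[step_index.toNat]?.any fun t =>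
        !(step_index == 0 && t == s + 1))
instance (file_lines : List String) (job_index : Int) (step_index : Int) : Decidable (D_find_azure_task_line_py file_lines job_index step_index) := by unfold D_find_azure_task_line_py; infer_instance

def Spec_find_azure_task_line_py (file_lines : List String) (job_index : Int) (step_index : Int) (out : Int) : Prop := ¬ D_find_azure_task_line_py file_lines job_index step_index → out = find_azure_task_line_py_alt file_lines job_index step_index
instance (file_lines : List String) (job_index : Int) (step_index : Int) (out : Int) : Decidable (Spec_find_azure_task_line_py file_lines job_index step_index out) := by unfold Spec_find_azure_task_line_py; infer_instance

def pvDiffWitness_find_azure_task_line_py : List String × Int × Int := (["x- job:", "steps:", "", "- task:"], 0, 0)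
def pvDiffWitnessOut_find_azure_task_line_py : Int × Int := (-1, 3)

-- ===== CLAIM (what is proved, stated in full; the proofs are below) =====
def Claim_unchanged_find_azure_task_line_py : Prop := ∀ (file_lines : List String) (job_index : Int) (step_index : Int), Dom_find_azure_task_line_py file_lines job_index step_index → Spec_find_azure_task_line_py file_lines job_index step_index (find_azure_task_line_py file_lines job_index step_index)
def Claim_changed_find_azure_task_line_py : Prop := Dom_find_azure_task_line_py (pvDiffWitness_find_azure_task_line_py.1) (pvDiffWitness_find_azure_task_line_py.2.1) (pvDiffWitness_find_azure_task_line_py.2.2) ∧ D_find_azure_task_line_py (pvDiffWitness_find_azure_task_line_py.1) (pvDiffWitness_find_azure_task_line_py.2.1) (pvDiffWitness_find_azure_task_line_py.2.2) ∧ find_azure_task_line_py (pvDiffWitness_find_azure_task_line_py.1) (pvDiffWitness_find_azure_task_line_py.2.1) (pvDiffWitness_find_azure_task_line_py.2.2) = pvDiffWitnessOut_find_azure_task_line_py.1 ∧ find_azure_task_line_py_alt (pvDiffWitness_find_azure_task_line_py.1) (pvDiffWitness_find_azure_task_line_py.2.1) (pvDiffWitness_find_azure_task_line_py.2.2) = pvDiffWitnessOut_find_azure_task_line_py.2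 ∧ pvDiffWitnessOut_find_azure_task_line_py.1 ≠ pvDiffWitnessOut_find_azure_task_line_py.2
def Claim_exact_find_azure_task_line_py : Prop := ∀ (file_lines : List String) (job_index : Int) (step_index : Int), Dom_find_azure_task_line_py file_lines job_index step_index → D_find_azure_task_line_py file_lines job_index step_index → find_azure_task_line_py file_lines job_index step_index ≠ find_azure_task_line_py_alt file_lines job_index step_index

-- ===== LEMMAS AND PROOFS =====

-- proof-side helper: Python-style non-negative indexing
def pvIdx? (l : List Nat) (n : Int) : Option Nat := if 0 ≤ n then l[n.toNat]? else none

-- xs[k]! and xs.getD k "" agree (both default to "")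
lemma getBang_eq (xs : List String) (k : Nat) : xs[k]! = xs.getD k "" := by
  rw [List.getElem!_eq_getElem?_getD, List.getD_eq_getElem?_getD]
  rfl

-- A's break condition on the stale line, as a two-conjunct flag
def bStop (line : String) : Bool :=
  (!(PySem.Str.strip line == "")) && (!(PySem.Str.startswith (PySem.Str.strip line) "-"))

-- a stripped string never starts with a space character
lemma startswith_strip_space (s : String) :
    PySem.Str.startswith (PySem.Str.strip s) " " = false := by
  rw [PySem.Str.startswith_eq, PySem.Str.toList_strip]
  show PySem.Chars.startswith (PySem.Chars.strip s.toList) [' '] = false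
  unfold PySem.Chars.strip PySem.Chars.rstrip PySem.Chars.lstrip
  set l1 := List.dropWhile PySem.Chars.isspace s.toList with hl1
  cases hc : (List.dropWhile PySem.Chars.isspace l1.reverse).reverse with
  | nil => rfl
  | cons c t =>
      have hsuf : List.dropWhile PySem.Chars.isspace l1.reverse <:+ l1.reverse :=
        List.dropWhile_suffix _
      have hpre : (c :: t) <+: l1 := by
        have := List.reverse_prefix.mpr hsuf
        rwa [List.reverse_reverse, hc] at this
      obtain ⟨r, hr⟩ := hpre
      have hl1c : l1 = c :: (t ++ r) := by rw [← hr]; simp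
      have hcne : PySem.Chars.isspace c = false := by
        have hne : List.dropWhile PySem.Chars.isspace s.toList ≠ [] := by
          rw [← hl1, hl1c]; simp
        have := List.head_dropWhile_not (p := PySem.Chars.isspace) (l := s.toList) hne
        have hq : (List.dropWhile PySem.Chars.isspace s.toList).head? = some c := by
          rw [← hl1, hl1c]; rfl
        rw [List.head?_eq_some_head hne, Option.some.injEq] at hq
        rw [hq] at this
        exact this
      have hcs : c ≠ ' ' := by
        intro h; rw [h] at hcne; exact absurd hcne (by decide)
      simp [PySem.Chars.startswith, List.isPrefixOf]
      exact fun h => hcs h.symm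

-- A's three-conjunct break condition equals the two-conjunct flag
lemma stopEq (line : String) : aBreak line = bStop line := by
  unfold aBreak
  rw [startswith_strip_space]; simp [bStop]

lemma range'_decomp (k n : Nat) (h : k < n) :
    List.range' k (n - k) = k :: List.range' (k + 1) (n - (k + 1)) := by
  rw [show n - k = (n - (k + 1)) + 1 by omega, List.range'_succ]

lemma getD_eq (xs : List String) (k : Nat) (h : k < xs.length) : xs.getD k "" = xs[k] := by
  simp [List.getD_eq_getElem?_getD, List.getElem?_eq_getElem h]

lemma pvIdx?_nil (n : Int) : pvIdx? [] n = none := by unfold pvIdx?; split <;> simp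
lemma pvIdx?_cons_zero (a : Nat) (l : List Nat) : pvIdx? (a :: l) 0 = some a := by simp [pvIdx?]
lemma pvIdx?_cons_ne (a : Nat) (l : List Nat) (n : Int) (h : n ≠ 0) :
    pvIdx? (a :: l) n = pvIdx? l (n - 1) := by
  unfold pvIdx?
  by_cases h0 : 0 ≤ n
  · rw [if_pos h0, if_pos (by omega), show n.toNat = (n - 1).toNat + 1 by omega]
    simp
  · rw [if_neg h0, if_neg (by omega)]

lemma mem_of_pvIdx? {l : List Nat} {n : Int} {a : Nat} (h : pvIdx? l n = some a) : a ∈ l := by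
  unfold pvIdx? at h
  split at h
  · exact List.mem_of_getElem? h
  · cases h

lemma pvHits_step (pat : String) (xs : List String) (k : Nat) (h : k < xs.length) :
    pvHits pat xs k
      = if PySem.Str.isIn pat (xs.getD k "") then k :: pvHits pat xs (k + 1) else pvHits pat xs (k + 1) := by
  unfold pvHits
  rw [range'_decomp k xs.length h, List.filter_cons]

lemma pvHits_nil (pat : String) (xs : List String) (k : Nat) (h : xs.length ≤ k) :
    pvHits pat xs k = [] := by
  unfold pvHits; rw [show xs.length - k = 0 by omega]; rfl

lemma head?_hits_step (xs : List String) (k : Nat) (h : k < xs.length) :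
    (pvHits "steps:" xs k).head?
      = if PySem.Str.isIn "steps:" (xs.getD k "") then some k else (pvHits "steps:" xs (k + 1)).head? := by
  rw [pvHits_step "steps:" xs k h]
  split <;> rfl

lemma pvHits_mem {pat : String} {xs : List String} {k t : Nat} (hk : k ≤ xs.length)
    (h : t ∈ pvHits pat xs k) :
    t < xs.length ∧ PySem.Str.isIn pat (xs.getD t "") = true := by
  unfold pvHits at h
  have h1 := List.mem_filter.1 h
  have h2 := (List.mem_range'_1.1 h1.1).2
  exact ⟨by omega, h1.2⟩

lemma head?_hits_lt {xs : List String} {k s : Nat} (hk : k ≤ xs.length)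
    (h : (pvHits "steps:" xs k).head? = some s) : s < xs.length := by
  cases hl : pvHits "steps:" xs k with
  | nil => rw [hl] at h; cases h
  | cons a l =>
      rw [hl] at h
      injection h with h
      exact (pvHits_mem hk (by rw [hl, ← h]; exact List.mem_cons_self)).1

-- A's first loop = indexing into the "- job:" hits
lemma jobLoop_char (xs : List String) (ji : Int) :
    ∀ (m k : Nat), k + m = xs.length → ∀ (jc : Int),
      aJobLoop (PySem.List.enumerate (xs.drop k) (k : Int)) ji jc
        = (pvIdx? (pvHits "- job:" xs k) (ji - jc - 1)).map (fun (j : Nat) => ((j : Int), xs.getD j "")) := by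
  intro m
  induction m with
  | zero =>
      intro k hk jc
      rw [List.drop_of_length_le (by omega)]
      have he : pvHits "- job:" xs k = [] := pvHits_nil _ _ _ (by omega)
      rw [he, pvIdx?_nil]; rfl
  | succ m ih =>
      intro k hk jc
      have hlt : k < xs.length := by omega
      have hcast : ((k : Int) + 1) = ((k + 1 : Nat) : Int) := by push_cast; ring
      rw [List.drop_eq_getElem_cons hlt, PySem.List.enumerate_cons, ← getD_eq xs k hlt,
          pvHits_step "- job:" xs k hlt]
      cases hc : PySem.Str.isIn "- job:" (xs.getD k "") with
      | false =>
          simp only [aJobLoop, hc, Bool.false_eq_true, reduceIte]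
          rw [hcast]; exact ih (k + 1) (by omega) jc
      | true =>
          by_cases hm : jc + 1 = ji
          · simp only [aJobLoop, hc, hm, reduceIte]
            rw [show ji - jc - 1 = 0 by omega, pvIdx?_cons_zero]
            rfl
          · simp only [aJobLoop, hc, hm, reduceIte]
            rw [hcast, ih (k + 1) (by omega) (jc + 1),
                pvIdx?_cons_ne _ _ _ (by omega), show ji - jc - 1 - 1 = ji - (jc + 1) - 1 by ring]

-- A's second loop = first "steps:" hit
lemma stepsLoop_char (xs : List String) :
    ∀ (m k : Nat), k + m = xs.length →
      aStepsLoop (PySem.List.pyRange (k : Int) (xs.length : Int) 1) xs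
        = (match (pvHits "steps:" xs k).head? with | some s => (s : Int) | none => -1) := by
  intro m
  induction m with
  | zero =>
      intro k hk
      rw [PySem.List.pyRange_one_eq_nil (by omega)]
      have he : (pvHits "steps:" xs k).head? = none := by rw [pvHits_nil _ _ _ (by omega)]; rfl
      rw [he]; rfl
  | succ m ih =>
      intro k hk
      have hlt : k < xs.length := by omega
      have hcast : ((k : Int) + 1) = ((k + 1 : Nat) : Int) := by push_cast; ring
      rw [PySem.List.pyRange_one_cons (by exact_mod_cast hlt), head?_hits_step xs k hlt]
      cases hc : PySem.Str.isIn "steps:" (xs.getD k "") with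
      | true =>
          simp only [aStepsLoop, PySem.List.pyGetD_natCast, hc, reduceIte]
      | false =>
          simp only [aStepsLoop, PySem.List.pyGetD_natCast, hc, Bool.false_eq_true, reduceIte]
          rw [hcast]; exact ih (k + 1) (by omega)

-- A's third loop with the break condition FALSE = indexing into the "- task:" hits
lemma taskA_false (xs : List String) (si : Int) (line : String) (hstop : bStop line = false) :
    ∀ (m k : Nat), k + m = xs.length → ∀ (sc : Int),
      aTaskLoop (PySem.List.pyRange (k : Int) (xs.length : Int) 1) xs line si sc
        = (match pvIdx? (pvHits "- task:" xs k) (si - sc - 1) with | some t => (t : Int) | none => -1) := by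
  intro m
  induction m with
  | zero =>
      intro k hk sc
      rw [PySem.List.pyRange_one_eq_nil (by omega)]
      have he : pvHits "- task:" xs k = [] := pvHits_nil _ _ _ (by omega)
      rw [he, pvIdx?_nil]; rfl
  | succ m ih =>
      intro k hk sc
      have hlt : k < xs.length := by omega
      have hcast : ((k : Int) + 1) = ((k + 1 : Nat) : Int) := by push_cast; ring
      rw [PySem.List.pyRange_one_cons (by exact_mod_cast hlt), pvHits_step "- task:" xs k hlt]
      cases hc : PySem.Str.isIn "- task:" (xs.getD k "") with
      | false =>
          simp only [aTaskLoop, PySem.List.pyGetD_natCast, hc, Bool.false_eq_true, reduceIte,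
            stopEq, hstop]
          rw [hcast]; exact ih (k + 1) (by omega) sc
      | true =>
          by_cases hm : sc + 1 = si
          · simp only [aTaskLoop, PySem.List.pyGetD_natCast, hc, hm, reduceIte]
            rw [show si - sc - 1 = 0 by omega, pvIdx?_cons_zero]
          · simp only [aTaskLoop, PySem.List.pyGetD_natCast, hc, hm, reduceIte, stopEq, hstop,
              Bool.false_eq_true]
            rw [hcast, ih (k + 1) (by omega) (sc + 1),
                pvIdx?_cons_ne _ _ _ (by omega), show si - sc - 1 - 1 = si - (sc + 1) - 1 by ring]

-- A's third loop with the break condition TRUE inspects only its first index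
lemma taskA_true (xs : List String) (si : Int) (line : String) (hstop : bStop line = true) (k : Nat) :
    aTaskLoop (PySem.List.pyRange (k : Int) (xs.length : Int) 1) xs line si (-1)
      = if k < xs.length ∧ PySem.Str.isIn "- task:" (xs.getD k "") = true ∧ si = 0 then (k : Int) else -1 := by
  by_cases hk : k < xs.length
  · rw [PySem.List.pyRange_one_cons (by exact_mod_cast hk)]
    simp only [aTaskLoop, PySem.List.pyGetD_natCast]
    cases hc : PySem.Str.isIn "- task:" (xs.getD k "") with
    | true =>
        simp only [reduceIte]
        by_cases hsi : si = 0
        · rw [if_pos (show (-1 : Int) + 1 = si by omega), if_pos ⟨hk, trivial, hsi⟩]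
        · rw [if_neg (show ¬((-1 : Int) + 1 = si) by omega), stopEq, hstop]
          simp only [reduceIte]
          rw [if_neg (by tauto)]
    | false =>
        simp only [Bool.false_eq_true, reduceIte, stopEq, hstop]
        rw [if_neg (by simp)]
  · rw [PySem.List.pyRange_one_eq_nil (by exact_mod_cast (by omega : xs.length ≤ k))]
    rw [if_neg (by tauto)]
    rfl

-- phase 2 of B = indexing into the "- task:" hits
lemma phase2_char (xs : List String) (ji si : Int) :
    ∀ (m k : Nat), k + m = xs.length → ∀ (jc sc : Int),
      bGo (PySem.List.enumerate (xs.drop k) (k : Int)) ji si 2 jc sc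
        = (match pvIdx? (pvHits "- task:" xs k) (si - sc - 1) with | some t => (t : Int) | none => -1) := by
  intro m
  induction m with
  | zero =>
      intro k hk jc sc
      rw [List.drop_of_length_le (by omega)]
      have he : pvHits "- task:" xs k = [] := pvHits_nil _ _ _ (by omega)
      rw [he, pvIdx?_nil]; rfl
  | succ m ih =>
      intro k hk jc sc
      have hlt : k < xs.length := by omega
      have hcast : ((k : Int) + 1) = ((k + 1 : Nat) : Int) := by push_cast; ring
      have e20 : ((2 : Nat) = 0) = False := eq_false (by decide)
      have e21 : ((2 : Nat) = 1) = False := eq_false (by decide)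
      rw [List.drop_eq_getElem_cons hlt, PySem.List.enumerate_cons, ← getD_eq xs k hlt,
          pvHits_step "- task:" xs k hlt]
      cases hc : PySem.Str.isIn "- task:" (xs.getD k "") with
      | false =>
          simp only [bGo, e20, e21, hc, Bool.false_eq_true, reduceIte]
          rw [hcast]; exact ih (k + 1) (by omega) jc sc
      | true =>
          by_cases hm : sc + 1 = si
          · simp only [bGo, e20, e21, hc, hm, reduceIte]
            rw [show si - sc - 1 = 0 by omega, pvIdx?_cons_zero]
          · simp only [bGo, e20, e21, hc, hm, reduceIte]
            rw [hcast, ih (k + 1) (by omega) jc (sc + 1),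
                pvIdx?_cons_ne _ _ _ (by omega), show si - sc - 1 - 1 = si - (sc + 1) - 1 by ring]

-- phase 1 of B = first "steps:" hit, then task indexing
lemma phase1_char (xs : List String) (ji si : Int) :
    ∀ (m k : Nat), k + m = xs.length → ∀ (jc : Int),
      bGo (PySem.List.enumerate (xs.drop k) (k : Int)) ji si 1 jc (-1)
        = (match (pvHits "steps:" xs k).head? with
           | none => -1
           | some s => (match pvIdx? (pvHits "- task:" xs (s + 1)) si with | some t => (t : Int) | none => -1)) := by
  intro m
  induction m with
  | zero =>
      intro k hk jc
      rw [List.drop_of_length_le (by omega)]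
      have he : (pvHits "steps:" xs k).head? = none := by rw [pvHits_nil _ _ _ (by omega)]; rfl
      rw [he]; rfl
  | succ m ih =>
      intro k hk jc
      have hlt : k < xs.length := by omega
      have hcast : ((k : Int) + 1) = ((k + 1 : Nat) : Int) := by push_cast; ring
      have e10 : ((1 : Nat) = 0) = False := eq_false (by decide)
      rw [List.drop_eq_getElem_cons hlt, PySem.List.enumerate_cons, ← getD_eq xs k hlt,
          head?_hits_step xs k hlt]
      cases hc : PySem.Str.isIn "steps:" (xs.getD k "") with
      | true =>
          simp only [bGo, e10, hc, reduceIte]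
          rw [hcast, phase2_char xs ji si m (k + 1) (by omega) jc (-1),
              show si - (-1) - 1 = si by ring]
      | false =>
          simp only [bGo, e10, hc, Bool.false_eq_true, reduceIte]
          rw [hcast]; exact ih (k + 1) (by omega) jc

-- phase 0 of B = job lookup, then steps, then task indexing
lemma phase0_char (xs : List String) (ji si : Int) :
    ∀ (m k : Nat), k + m = xs.length → ∀ (jc : Int),
      bGo (PySem.List.enumerate (xs.drop k) (k : Int)) ji si 0 jc (-1)
        = (match pvIdx? (pvHits "- job:" xs k) (ji - jc - 1) with
           | none => -1
           | some j =>
             (match (pvHits "steps:" xs j).head? with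
              | none => -1
              | some s => (match pvIdx? (pvHits "- task:" xs (s + 1)) si with | some t => (t : Int) | none => -1))) := by
  intro m
  induction m with
  | zero =>
      intro k hk jc
      rw [List.drop_of_length_le (by omega)]
      have he : pvHits "- job:" xs k = [] := pvHits_nil _ _ _ (by omega)
      rw [he, pvIdx?_nil]; rfl
  | succ m ih =>
      intro k hk jc
      have hlt : k < xs.length := by omega
      have hcast : ((k : Int) + 1) = ((k + 1 : Nat) : Int) := by push_cast; ring
      rw [List.drop_eq_getElem_cons hlt, PySem.List.enumerate_cons, ← getD_eq xs k hlt,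
          pvHits_step "- job:" xs k hlt]
      cases hc : PySem.Str.isIn "- job:" (xs.getD k "") with
      | false =>
          simp only [bGo, hc, Bool.false_eq_true, reduceIte]
          rw [hcast]; exact ih (k + 1) (by omega) jc
      | true =>
          by_cases hm : jc + 1 = ji
          · simp only [bGo, hc, hm, reduceIte]
            rw [show ji - jc - 1 = 0 by omega, pvIdx?_cons_zero]
            cases hs : PySem.Str.isIn "steps:" (xs.getD k "") with
            | true =>
                simp only [reduceIte]
                rw [hcast, phase2_char xs ji si m (k + 1) (by omega) ji (-1),
                    show si - (-1) - 1 = si by ring, head?_hits_step xs k hlt, if_pos hs]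
            | false =>
                simp only [Bool.false_eq_true, reduceIte]
                rw [hcast, phase1_char xs ji si m (k + 1) (by omega) ji,
                    head?_hits_step xs k hlt]
                simp only [hs, Bool.false_eq_true, reduceIte]
          · simp only [bGo, hc, hm, reduceIte]
            rw [hcast, ih (k + 1) (by omega) (jc + 1),
                pvIdx?_cons_ne _ _ _ (by omega), show ji - jc - 1 - 1 = ji - (jc + 1) - 1 by ring]

-- B as a whole, in pvHits/pvIdx? form
lemma alt_char (xs : List String) (ji si : Int) :
    find_azure_task_line_py_alt xs ji si
      = (match pvIdx? (pvHits "- job:" xs 0) ji with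
         | none => -1
         | some j =>
           (match (pvHits "steps:" xs j).head? with
            | none => -1
            | some s => (match pvIdx? (pvHits "- task:" xs (s + 1)) si with | some t => (t : Int) | none => -1))) := by
  have h := phase0_char xs ji si xs.length 0 (by omega) (-1)
  simp only [List.drop_zero, Int.natCast_zero] at h
  rw [find_azure_task_line_py_alt, h, show ji - (-1) - 1 = ji by ring]

-- A as a whole, after resolving the job and steps searches
lemma a_char (xs : List String) (ji si : Int) :
    find_azure_task_line_py xs ji si
      = (match pvIdx? (pvHits "- job:" xs 0) ji with
         | none => -1
         | some j =>
           (match (pvHits "steps:" xs j).head? with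
            | none => -1
            | some s =>
              aTaskLoop (PySem.List.pyRange (((s + 1 : Nat) : Int)) (xs.length : Int) 1) xs
                (xs.getD j "") si (-1))) := by
  have h := jobLoop_char xs ji xs.length 0 (by omega) (-1)
  simp only [List.drop_zero, Int.natCast_zero] at h
  rw [find_azure_task_line_py, h, show ji - (-1) - 1 = ji by ring,
      show pvIdx? (pvHits "- job:" xs 0) ji = pvIdx? (pvHits "- job:" xs 0) ji from rfl]
  cases hJ : pvIdx? (pvHits "- job:" xs 0) ji with
  | none => rfl
  | some j =>
      have hjlt : j < xs.length := (pvHits_mem (by omega) (mem_of_pvIdx? hJ)).1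
      -- both outer matches reduced definitionally via `show`
      show (if aStepsLoop (PySem.List.pyRange ((j : Int)) ((xs.length : Nat) : Int) 1) xs < 0 then -1
            else aTaskLoop (PySem.List.pyRange (aStepsLoop (PySem.List.pyRange ((j : Int)) ((xs.length : Nat) : Int) 1) xs + 1) ((xs.length : Nat) : Int) 1) xs (xs.getD j "") si (-1))
          = (match (pvHits "steps:" xs j).head? with
             | none => -1
             | some s =>
               aTaskLoop (PySem.List.pyRange (((s + 1 : Nat) : Int)) ((xs.length : Nat) : Int) 1) xs
                 (xs.getD j "") si (-1))
      rw [stepsLoop_char xs (xs.length - j) j (by omega)]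
      cases hS : (pvHits "steps:" xs j).head? with
      | none => simp
      | some s =>
          have hslt : s < xs.length := head?_hits_lt (by omega) hS
          simp only [if_neg (show ¬((s : Int) < 0) by omega)]
          rw [show (s : Int) + 1 = ((s + 1 : Nat) : Int) by push_cast; ring]

-- case-style corollaries of a_char / alt_char
lemma a_char_none (xs : List String) (ji si : Int) (hJ : pvIdx? (pvHits "- job:" xs 0) ji = none) :
    find_azure_task_line_py xs ji si = -1 := by
  rw [a_char, hJ]

lemma a_char2n (xs : List String) (ji si : Int) (j : Nat) (hJ : pvIdx? (pvHits "- job:" xs 0) ji = some j)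
    (hS : (pvHits "steps:" xs j).head? = none) : find_azure_task_line_py xs ji si = -1 := by
  rw [a_char, hJ]
  show (match (pvHits "steps:" xs j).head? with
        | none => (-1 : Int)
        | some s =>
          aTaskLoop (PySem.List.pyRange (((s + 1 : Nat) : Int)) (xs.length : Int) 1) xs
            (xs.getD j "") si (-1)) = -1
  rw [hS]

lemma a_char2 (xs : List String) (ji si : Int) (j s : Nat) (hJ : pvIdx? (pvHits "- job:" xs 0) ji = some j)
    (hS : (pvHits "steps:" xs j).head? = some s) :
    find_azure_task_line_py xs ji si
      = aTaskLoop (PySem.List.pyRange (((s + 1 : Nat) : Int)) (xs.length : Int) 1) xs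
          (xs.getD j "") si (-1) := by
  rw [a_char, hJ]
  show (match (pvHits "steps:" xs j).head? with
        | none => (-1 : Int)
        | some s =>
          aTaskLoop (PySem.List.pyRange (((s + 1 : Nat) : Int)) (xs.length : Int) 1) xs
            (xs.getD j "") si (-1)) = _
  rw [hS]

lemma alt_char_none (xs : List String) (ji si : Int) (hJ : pvIdx? (pvHits "- job:" xs 0) ji = none) :
    find_azure_task_line_py_alt xs ji si = -1 := by
  rw [alt_char, hJ]

lemma alt_char2n (xs : List String) (ji si : Int) (j : Nat) (hJ : pvIdx? (pvHits "- job:" xs 0) ji = some j)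
    (hS : (pvHits "steps:" xs j).head? = none) : find_azure_task_line_py_alt xs ji si = -1 := by
  rw [alt_char, hJ]
  show (match (pvHits "steps:" xs j).head? with
        | none => (-1 : Int)
        | some s => (match pvIdx? (pvHits "- task:" xs (s + 1)) si with | some t => (t : Int) | none => -1)) = -1
  rw [hS]

lemma alt_char2 (xs : List String) (ji si : Int) (j s : Nat) (hJ : pvIdx? (pvHits "- job:" xs 0) ji = some j)
    (hS : (pvHits "steps:" xs j).head? = some s) :
    find_azure_task_line_py_alt xs ji si
      = (match pvIdx? (pvHits "- task:" xs (s + 1)) si with | some t => (t : Int) | none => -1) := by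
  rw [alt_char, hJ]
  show (match (pvHits "steps:" xs j).head? with
        | none => (-1 : Int)
        | some s => (match pvIdx? (pvHits "- task:" xs (s + 1)) si with | some t => (t : Int) | none => -1)) = _
  rw [hS]

-- ===== VERDICT (by name: the statements are the Claim_ definitions above) =====
theorem find_azure_task_line_py_spec : Claim_unchanged_find_azure_task_line_py := by
  intro xs ji si _ hnd
  unfold D_find_azure_task_line_py at hnd
  cases hJ : pvIdx? (pvHits "- job:" xs 0) ji with
  | none => rw [a_char_none xs ji si hJ, alt_char_none xs ji si hJ]
  | some j =>
      have hjlt : j < xs.length := (pvHits_mem (by omega) (mem_of_pvIdx? hJ)).1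
      have hji : 0 ≤ ji := by
        have h := hJ; unfold pvIdx? at h
        by_cases h0 : 0 ≤ ji
        · exact h0
        · rw [if_neg h0] at h; cases h
      have hJi : (pvHits "- job:" xs 0)[ji.toNat]? = some j := by
        have h := hJ; unfold pvIdx? at h; rwa [if_pos hji] at h
      cases haB : aBreak (xs.getD j "") with
      | false =>
          have hbs : bStop (xs.getD j "") = false := by rw [← stopEq]; exact haB
          cases hS : (pvHits "steps:" xs j).head? with
          | none => rw [a_char2n xs ji si j hJ hS, alt_char2n xs ji si j hJ hS]
          | some s =>
              rw [a_char2 xs ji si j s hJ hS, alt_char2 xs ji si j s hJ hS,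
                  taskA_false xs si (xs.getD j "") hbs (xs.length - (s + 1)) (s + 1)
                    (by have := head?_hits_lt (xs := xs) (k := j) (by omega) hS; omega) (-1),
                  show si - (-1) - 1 = si by ring]
      | true =>
          have hbs : bStop (xs.getD j "") = true := by rw [← stopEq]; exact haB
          cases hS : (pvHits "steps:" xs j).head? with
          | none => rw [a_char2n xs ji si j hJ hS, alt_char2n xs ji si j hJ hS]
          | some s =>
              have hslt : s < xs.length := head?_hits_lt (by omega) hS
              rw [a_char2 xs ji si j s hJ hS, alt_char2 xs ji si j s hJ hS,
                  taskA_true xs si (xs.getD j "") hbs (s + 1)]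
              cases hT : pvIdx? (pvHits "- task:" xs (s + 1)) si with
              | none =>
                  rw [if_neg]
                  intro ⟨h1, h2, h3⟩
                  have hsome : pvIdx? (pvHits "- task:" xs (s + 1)) si = some (s + 1) := by
                    rw [pvHits_step "- task:" xs (s + 1) h1, if_pos h2, h3, pvIdx?_cons_zero]
                  rw [hT] at hsome; cases hsome
              | some t =>
                  have hsi : 0 ≤ si := by
                    have h := hT; unfold pvIdx? at h
                    by_cases h0 : 0 ≤ si
                    · exact h0
                    · rw [if_neg h0] at h; cases h
                  have hTi : (pvHits "- task:" xs (s + 1))[si.toNat]? = some t := by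
                    have h := hT; unfold pvIdx? at h; rwa [if_pos hsi] at h
                  have haB' : aBreak (xs[j]!) = true := by rw [getBang_eq]; exact haB
                  have hD : ((pvHits "- job:" xs 0)[ji.toNat]?.any fun j =>
                      aBreak xs[j]! &&
                      (pvHits "steps:" xs j).head?.any fun s =>
                        (pvHits "- task:" xs (s + 1))[si.toNat]?.any fun t =>
                          !(si == 0 && t == s + 1)) = false :=
                    Bool.eq_false_iff.mpr (fun hb => hnd ⟨by omega, hb⟩)
                  simp only [hJi, hS, hTi, Option.any_some, haB', Bool.true_and] at hD
                  rw [Bool.not_eq_false'] at hD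
                  simp only [Bool.and_eq_true, beq_iff_eq] at hD
                  obtain ⟨hsi0, hts⟩ := hD
                  have hmem := pvHits_mem (xs := xs) (k := s + 1) (by omega) (mem_of_pvIdx? hT)
                  rw [if_pos ⟨by omega, by rw [← hts]; exact hmem.2, hsi0⟩, hts]

theorem find_azure_task_line_py_changed : Claim_changed_find_azure_task_line_py := by
  unfold Claim_changed_find_azure_task_line_py; decide

theorem find_azure_task_line_py_tight : Claim_exact_find_azure_task_line_py := by
  intro xs ji si _ hd
  unfold D_find_azure_task_line_py at hd
  obtain ⟨hm, hb⟩ := hd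
  have hji : 0 ≤ ji := by omega
  have hsi : 0 ≤ si := by omega
  cases hJ : (pvHits "- job:" xs 0)[ji.toNat]? with
  | none => simp only [hJ, Option.any_none] at hb; exact absurd hb (by decide)
  | some j =>
      have hJp : pvIdx? (pvHits "- job:" xs 0) ji = some j := by
        unfold pvIdx?; rw [if_pos hji, hJ]
      have hjlt : j < xs.length := (pvHits_mem (by omega) (mem_of_pvIdx? hJp)).1
      simp only [hJ, Option.any_some, Bool.and_eq_true] at hb
      obtain ⟨haB, hb⟩ := hb
      have hbs : bStop (xs.getD j "") = true := by rw [← stopEq, ← getBang_eq]; exact haB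
      cases hS : (pvHits "steps:" xs j).head? with
      | none => simp only [hS, Option.any_none] at hb; exact absurd hb (by decide)
      | some s =>
          have hslt : s < xs.length := head?_hits_lt (by omega) hS
          simp only [hS, Option.any_some] at hb
          cases hT : (pvHits "- task:" xs (s + 1))[si.toNat]? with
          | none => simp only [hT, Option.any_none] at hb; exact absurd hb (by decide)
          | some t =>
              have hTp : pvIdx? (pvHits "- task:" xs (s + 1)) si = some t := by
                unfold pvIdx?; rw [if_pos hsi, hT]
              simp only [hT, Option.any_some] at hb
              rw [Bool.not_eq_true'] at hb
              rw [Bool.and_eq_false_iff] at hb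
              rw [a_char2 xs ji si j s hJp hS, alt_char2 xs ji si j s hJp hS,
                  taskA_true xs si (xs.getD j "") hbs (s + 1), hTp]
              have hmem := pvHits_mem (xs := xs) (k := s + 1) (by omega) (mem_of_pvIdx? hTp)
              rw [if_neg]
              · intro h
                have : (t : Int) = -1 := h.symm
                omega
              · intro ⟨h1, h2, h3⟩
                have hsome : pvIdx? (pvHits "- task:" xs (s + 1)) si = some (s + 1) := by
                  rw [pvHits_step "- task:" xs (s + 1) h1, if_pos h2, h3, pvIdx?_cons_zero]
                rw [hTp] at hsome
                injection hsome with hts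
                rcases hb with hb | hb
                · rw [h3] at hb; simp at hb
                · rw [hts] at hb; simp at hb
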